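-- pv_equiv track=rewrite | github.com/alex07308/13.09.23 | censor.py | get_word_case_mutations
-- ===== SOURCE A (Python) =====
-- from typing import List
--
-- def  get_word_case_mutations(word: str) -> List[str]:
--     def fill_zeros(text: str) -> str:
--          filler = (len(word) - len(text)) * '0'
--          return filler + text
--     word = word.lower()
--     result = []
--     for i in range(2 ** len(word)):
--         bits = fill_zeros(bin(i)[2:])
--         new = ''
--         for char, bit in zip(word, bits):
--             new += char.upper() if bit == '1' else char
--         result.append(new)
--     return result
-- ===== SOURCE B (Python) =====
-- from typing import List
--
-- def get_word_case_mutations(word: str) -> List[str]: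
--     word = word.lower()
--     result = ['']
--     for ch in word:
--         result = [p + v for p in result for v in (ch, ch.upper())]
--     return result
-- ===== Notes on version B (the rewrite author's own statement) =====
-- stated objective: idiomatic
-- what changed: B builds the mutation list by a cartesian-product fold over the characters ((lower, upper) per position, rightmost fastest) instead of enumerating integers 0..2^n-1 and decoding each via bin()/zero-padding/bit-zip.
import Mathlib
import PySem

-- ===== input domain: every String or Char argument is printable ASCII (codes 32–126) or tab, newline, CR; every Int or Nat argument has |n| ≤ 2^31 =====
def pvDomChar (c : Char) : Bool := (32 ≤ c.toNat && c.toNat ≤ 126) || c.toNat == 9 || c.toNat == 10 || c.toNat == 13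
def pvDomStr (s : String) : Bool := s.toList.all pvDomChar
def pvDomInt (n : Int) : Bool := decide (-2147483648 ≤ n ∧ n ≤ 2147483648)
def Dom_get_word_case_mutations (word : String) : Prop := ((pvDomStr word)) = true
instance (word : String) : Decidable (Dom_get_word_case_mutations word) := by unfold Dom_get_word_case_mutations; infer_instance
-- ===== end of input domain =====

-- B replaces A's integer-enumeration-and-bit-decoding with a cartesian-product fold over the characters (idiomatic itertools.product style); same return value.

-- ===== PORT A =====
-- binary digits of m, LSB first (helper for the hand port of Python's bin; exact for m ≥ 0)
def pvBinL (n : Nat) : List Char :=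
  if h : n = 0 then [] else (if n % 2 = 1 then '1' else '0') :: pvBinL (n / 2)
termination_by n
decreasing_by exact Nat.div_lt_self (Nat.pos_of_ne_zero h) (by norm_num)

-- bin(m)[2:] for m ≥ 0 (MSB first, '0' for zero)
def pvBinChars (m : Nat) : List Char := if m = 0 then ['0'] else (pvBinL m).reverse

-- Python's bin(i), ported by hand (exact: '0b'/'-0b' prefix plus binary digits of |i|)
def pvBin (i : Int) : List Char :=
  if i < 0 then '-' :: '0' :: 'b' :: pvBinChars i.natAbs else '0' :: 'b' :: pvBinChars i.natAbs

-- fill_zeros: '(len(word) - len(text)) * "0" + text'; Nat subtraction truncates at 0 exactly as Python's negative string repetition gives ''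
def pvFillZeros (n : Nat) (t : List Char) : List Char := List.replicate (n - t.length) '0' ++ t

-- 'word = word.lower()' is a rebinding: every later use of word below is the lowered list
def get_word_case_mutations (word : String) : List String :=
  (PySem.List.pyRange 0 ((2 : Int) ^ (PySem.Str.lower word).toList.length) 1).foldl (fun result i =>
    -- bits = fill_zeros(bin(i)[2:]); the slice [2:] is ported as drop 2 — exact: the string has ≥ 2 chars, start is the nonnegative literal 2
    -- new = '' followed by 'new += char.upper() if bit == '1' else char' over zip(word, bits)
    result ++ [String.ofList
      (((PySem.Str.lower word).toList.zip
          (pvFillZeros (PySem.Str.lower word).toList.length ((pvBin i).drop 2))).foldl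
        (fun new cb => new ++ [if cb.2 = '1' then PySem.Chars.upperChar cb.1 else cb.1]) [])]) []

-- ===== PORT B =====
def get_word_case_mutations_alt (word : String) : List String :=
  -- result = ['']; for ch in word: result = [p + v for p in result for v in (ch, ch.upper())]
  ((PySem.Str.lower word).toList.foldl (fun result ch =>
      result.flatMap (fun p => [ch, PySem.Chars.upperChar ch].map (fun v => p ++ [v])))
    [[]]).map String.ofList

-- ===== PRECONDITION & SPEC =====
def Spec_get_word_case_mutations (word : String) (out : List String) : Prop := out = get_word_case_mutations_alt word
instance (word : String) (out : List String) : Decidable (Spec_get_word_case_mutations word out) := by unfold Spec_get_word_case_mutations; infer_instance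

-- ===== CLAIM (what is proved, stated in full; the proofs are below) =====
def Claim_equal_get_word_case_mutations : Prop := ∀ (word : String), Dom_get_word_case_mutations word → Spec_get_word_case_mutations word (get_word_case_mutations word)

-- ===== LEMMAS AND PROOFS =====

-- canonical list of case mutations: first character varies slowest, lowercase before uppercase
def pvMuts : List Char → List (List Char)
  | [] => [[]]
  | c :: cs => (pvMuts cs).map (fun t => c :: t) ++ (pvMuts cs).map (fun t => PySem.Chars.upperChar c :: t)

-- the string A builds at loop index i over the lowered word cs
def pvAcore (cs : List Char) (i : Nat) : List Char :=
  (cs.zip (pvFillZeros cs.length ((pvBin (i : Int)).drop 2))).map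
    (fun cb => if cb.2 = '1' then PySem.Chars.upperChar cb.1 else cb.1)

lemma pvBinL_zero : pvBinL 0 = [] := by rw [pvBinL]; simp

lemma pvBinL_ne (n : Nat) (h : n ≠ 0) :
    pvBinL n = (if n % 2 = 1 then '1' else '0') :: pvBinL (n / 2) := by
  rw [pvBinL]; simp [h]

lemma pvBin_drop (i : Nat) : (pvBin (i : Int)).drop 2 = pvBinChars i := by
  rw [pvBin, if_neg (by omega)]
  simp

lemma pvBinL_length_le (n i : Nat) (h : i < 2 ^ n) : (pvBinL i).length ≤ n := by
  induction n generalizing i with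
  | zero =>
    have : i = 0 := by simpa using h
    simp [this, pvBinL_zero]
  | succ n ih =>
    by_cases h0 : i = 0
    · simp [h0, pvBinL_zero]
    · rw [pvBinL_ne i h0, List.length_cons]
      have := ih (i / 2) (by omega)
      omega

lemma pvBinChars_length_le (i n : Nat) (h : i < 2 ^ n) (hn : 1 ≤ n) :
    (pvBinChars i).length ≤ n := by
  by_cases h0 : i = 0
  · simpa [pvBinChars, h0] using hn
  · rw [pvBinChars, if_neg h0, List.length_reverse]
    exact pvBinL_length_le n i h

lemma pvFill_succ (n : Nat) (t : List Char) (h : t.length ≤ n) :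
    pvFillZeros (n + 1) t = '0' :: pvFillZeros n t := by
  unfold pvFillZeros
  rw [show n + 1 - t.length = (n - t.length) + 1 by omega, List.replicate_succ]
  simp

lemma pvBinL_pow_add (n j : Nat) (h : j < 2 ^ n) :
    pvBinL (2 ^ n + j) = pvBinL j ++ List.replicate (n - (pvBinL j).length) '0' ++ ['1'] := by
  induction n generalizing j with
  | zero =>
    have : j = 0 := by simpa using h
    subst this
    show pvBinL 1 = pvBinL 0 ++ List.replicate (0 - (pvBinL 0).length) '0' ++ ['1']
    rw [pvBinL_ne 1 (by omega)]
    simp [pvBinL_zero]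
  | succ n ih =>
    rw [pvBinL_ne _ (by positivity)]
    have hmod : (2 ^ (n + 1) + j) % 2 = j % 2 := by omega
    have hdiv : (2 ^ (n + 1) + j) / 2 = 2 ^ n + j / 2 := by omega
    rw [hmod, hdiv, ih (j / 2) (by omega)]
    by_cases hj : j = 0
    · subst hj
      simp [pvBinL_zero, List.replicate_succ]
    · conv_rhs => rw [pvBinL_ne j hj]
      simp only [List.length_cons]
      have : n + 1 - ((pvBinL (j / 2)).length + 1) = n - (pvBinL (j / 2)).length := by omega
      simp [this]

lemma pvBinChars_pow_add (n j : Nat) (hn : 1 ≤ n) (h : j < 2 ^ n) :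
    pvBinChars (2 ^ n + j) = '1' :: pvFillZeros n (pvBinChars j) := by
  rw [pvBinChars, if_neg (by positivity), pvBinL_pow_add n j h]
  by_cases hj : j = 0
  · subst hj
    obtain ⟨m, rfl⟩ : ∃ m, n = m + 1 := ⟨n - 1, by omega⟩
    simp [pvBinL_zero, pvBinChars, pvFillZeros, List.reverse_append]
    rw [List.replicate_succ']
  · rw [pvBinChars, if_neg hj]
    simp [pvFillZeros, List.reverse_append]

lemma pvAcore_nil (i : Nat) : pvAcore [] i = [] := by simp [pvAcore]

lemma pvAcore_low (c : Char) (cs : List Char) (i : Nat) (h : i < 2 ^ cs.length) :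
    pvAcore (c :: cs) i = c :: pvAcore cs i := by
  rcases Nat.eq_zero_or_pos cs.length with hn | hn
  · rw [List.length_eq_zero_iff] at hn; subst hn
    have hi : i = 0 := by simpa using h
    subst hi
    simp [pvAcore, pvBin, pvBinChars, pvFillZeros]
  · unfold pvAcore
    rw [pvBin_drop, List.length_cons,
      pvFill_succ cs.length _ (pvBinChars_length_le i cs.length h hn)]
    simp

lemma pvAcore_high (c : Char) (cs : List Char) (j : Nat) (h : j < 2 ^ cs.length) :
    pvAcore (c :: cs) (2 ^ cs.length + j) = PySem.Chars.upperChar c :: pvAcore cs j := by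
  rcases Nat.eq_zero_or_pos cs.length with hn | hn
  · rw [List.length_eq_zero_iff] at hn; subst hn
    have hj : j = 0 := by simpa using h
    subst hj
    simp [pvAcore, pvBin, pvBinChars, pvFillZeros, pvBinL_ne 1 (by omega), pvBinL_zero]
  · unfold pvAcore
    rw [pvBin_drop, pvBin_drop, List.length_cons,
      pvBinChars_pow_add cs.length j hn h]
    have hlen : ('1' :: pvFillZeros cs.length (pvBinChars j)).length = cs.length + 1 := by
      simp only [List.length_cons, pvFillZeros, List.length_append, List.length_replicate]
      have := pvBinChars_length_le j cs.length h hn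
      omega
    rw [show pvFillZeros (cs.length + 1) ('1' :: pvFillZeros cs.length (pvBinChars j))
          = '1' :: pvFillZeros cs.length (pvBinChars j) by
      unfold pvFillZeros at hlen ⊢; rw [hlen]; simp]
    simp

lemma pvA_eq_muts (cs : List Char) :
    (List.range (2 ^ cs.length)).map (pvAcore cs) = pvMuts cs := by
  induction cs with
  | nil => simp [pvMuts, pvAcore_nil]
  | cons c cs ih =>
    rw [List.length_cons, show (2 : Nat) ^ (cs.length + 1) = 2 ^ cs.length + 2 ^ cs.length by ring,
      List.range_add, List.map_append, List.map_map]
    rw [pvMuts, ← ih, List.map_map, List.map_map]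
    congr 1
    · apply List.map_congr_left
      intro i hi
      exact pvAcore_low c cs i (List.mem_range.mp hi)
    · apply List.map_congr_left
      intro j hj
      exact pvAcore_high c cs j (List.mem_range.mp hj)

lemma pvB_fold (cs : List Char) (acc : List (List Char)) :
    cs.foldl (fun result ch =>
        result.flatMap (fun p => [ch, PySem.Chars.upperChar ch].map (fun v => p ++ [v]))) acc
      = acc.flatMap (fun p => (pvMuts cs).map (fun t => p ++ t)) := by
  induction cs generalizing acc with
  | nil => simp [pvMuts]
  | cons c cs ih =>
    rw [List.foldl_cons, ih, List.flatMap_assoc]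
    simp only [pvMuts, List.map_append, List.map_map]
    apply List.flatMap_congr
    intro p _
    simp [Function.comp_def, List.append_assoc]

lemma pvA_eq (word : String) :
    get_word_case_mutations word
      = (pvMuts (PySem.Str.lower word).toList).map String.ofList := by
  unfold get_word_case_mutations
  rw [← pvA_eq_muts]
  set w := (PySem.Str.lower word).toList with hw
  rw [show (fun (result : List String) (i : Int) =>
      result ++ [String.ofList
        ((w.zip (pvFillZeros w.length ((pvBin i).drop 2))).foldl
          (fun new cb => new ++ [if cb.2 = '1' then PySem.Chars.upperChar cb.1 else cb.1]) [])])
    = fun result i => result ++ [String.ofList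
        ((w.zip (pvFillZeros w.length ((pvBin i).drop 2))).map
          (fun cb => if cb.2 = '1' then PySem.Chars.upperChar cb.1 else cb.1))] from by
      funext result i
      rw [PySem.List.foldl_append_singleton_eq_map]
      simp]
  rw [PySem.List.foldl_append_singleton_eq_map
    (f := fun i : Int => String.ofList
      ((w.zip (pvFillZeros w.length ((pvBin i).drop 2))).map
        (fun cb => if cb.2 = '1' then PySem.Chars.upperChar cb.1 else cb.1)))]
  rw [PySem.List.pyRange_one, List.map_map, List.map_map]
  rw [show ((2 : Int) ^ w.length - 0).toNat = 2 ^ w.length by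
    rw [sub_zero]; exact_mod_cast Int.toNat_natCast _]
  apply List.map_congr_left
  intro k _
  simp [pvAcore]

lemma pvB_eq (word : String) :
    get_word_case_mutations_alt word
      = (pvMuts (PySem.Str.lower word).toList).map String.ofList := by
  unfold get_word_case_mutations_alt
  rw [pvB_fold]
  simp

-- ===== VERDICT (by name: the statement is the Claim_ definition above) =====
theorem get_word_case_mutations_spec : Claim_equal_get_word_case_mutations := by
  intro word _
  unfold Spec_get_word_case_mutations
  rw [pvA_eq, pvB_eq]
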